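-- pv_equiv track=rewrite | github.com/lipan6461188/IPyRSSA | Visual.py | __base_color_base_cmd
-- ===== SOURCE A (Python) =====
-- def __base_color_base_cmd(seq):
--     A = ""
--     T = ""
--     C = ""
--     G = ""
--     for idx in range(len(seq)):
--         if seq[idx] == 'A':
--             A += str(idx+1) if A == "" else ','+str(idx+1)
--         if seq[idx] == 'C':
--             C += str(idx+1) if C == "" else ','+str(idx+1)
--         if seq[idx] == 'T' or seq[idx] == 'U':
--             T += str(idx+1) if T == "" else ','+str(idx+1)
--         if seq[idx] == 'G':
--             G += str(idx+1) if G == "" else ','+str(idx+1)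
--     CMD = ""
--     if A: CMD += "-applyBasesStyle1on \"%s\" " % (A, )
--     if T: CMD += "-applyBasesStyle2on \"%s\" " % (T, )
--     if C: CMD += "-applyBasesStyle3on \"%s\" " % (C, )
--     if G: CMD += "-applyBasesStyle4on \"%s\" " % (G, )
--     return CMD
-- ===== SOURCE B (Python) =====
-- def __base_color_base_cmd(seq):
--     def bucket(chars):
--         return ",".join(str(i + 1) for i, ch in enumerate(seq) if ch in chars)
--
--     a, t, c, g = bucket("A"), bucket("TU"), bucket("C"), bucket("G")
--     cmd = ""
--     if a:
--         cmd += '-applyBasesStyle1on "%s" ' % a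
--     if t:
--         cmd += '-applyBasesStyle2on "%s" ' % t
--     if c:
--         cmd += '-applyBasesStyle3on "%s" ' % c
--     if g:
--         cmd += '-applyBasesStyle4on "%s" ' % g
--     return cmd
-- ===== Notes on version B (the rewrite author's own statement) =====
-- stated objective: idiomatic
-- what changed: Replaces the single index loop with four conditional string-appends and empty-string checks by four independent bucket scans, each built declaratively as a comma-join over a filtered enumerate, then assembles the command from the four buckets.
import Mathlib
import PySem

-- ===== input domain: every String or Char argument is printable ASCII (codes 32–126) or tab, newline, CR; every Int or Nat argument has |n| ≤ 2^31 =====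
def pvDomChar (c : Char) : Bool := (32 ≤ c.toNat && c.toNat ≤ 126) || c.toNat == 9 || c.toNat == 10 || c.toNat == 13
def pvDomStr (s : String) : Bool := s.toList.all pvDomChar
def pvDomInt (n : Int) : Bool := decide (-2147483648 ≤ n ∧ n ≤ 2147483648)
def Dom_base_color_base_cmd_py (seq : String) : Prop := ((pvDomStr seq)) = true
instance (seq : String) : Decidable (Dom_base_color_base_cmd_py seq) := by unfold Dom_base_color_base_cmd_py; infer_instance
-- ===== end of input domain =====

-- B replaces A's single index loop with four independent bucket scans comma-joined (idiomatic decomposition, same cost).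


-- ===== PORT A =====
-- the four accumulators A, T, C, G, updated over range(len(seq)) exactly as in A
def bccALoop : List Char → Int → List Char → List Char → List Char → List Char →
    List Char × List Char × List Char × List Char
  | [], _, A, T, C, G => (A, T, C, G)
  | ch :: rest, idx, A, T, C, G =>
    let A' := if ch = 'A' then (if A = [] then A ++ PySem.Int.toChars (idx + 1) else A ++ ',' :: PySem.Int.toChars (idx + 1)) else A
    let C' := if ch = 'C' then (if C = [] then C ++ PySem.Int.toChars (idx + 1) else C ++ ',' :: PySem.Int.toChars (idx + 1)) else C
    let T' := if ch = 'T' ∨ ch = 'U' then (if T = [] then T ++ PySem.Int.toChars (idx + 1) else T ++ ',' :: PySem.Int.toChars (idx + 1)) else T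
    let G' := if ch = 'G' then (if G = [] then G ++ PySem.Int.toChars (idx + 1) else G ++ ',' :: PySem.Int.toChars (idx + 1)) else G
    bccALoop rest (idx + 1) A' T' C' G'

def base_color_base_cmd_py (seq : String) : String :=
  let r := bccALoop seq.toList 0 [] [] [] []
  String.mk
    ((if r.1 ≠ [] then "-applyBasesStyle1on \"".toList ++ r.1 ++ "\" ".toList else []) ++
     (if r.2.1 ≠ [] then "-applyBasesStyle2on \"".toList ++ r.2.1 ++ "\" ".toList else []) ++
     (if r.2.2.1 ≠ [] then "-applyBasesStyle3on \"".toList ++ r.2.2.1 ++ "\" ".toList else []) ++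
     (if r.2.2.2 ≠ [] then "-applyBasesStyle4on \"".toList ++ r.2.2.2 ++ "\" ".toList else []))

-- ===== PORT B =====
-- ",".join(str(i+1) for i, ch in enumerate(seq) if ch in chars)
def bccBucket (seq : String) (chars : List Char) : List Char :=
  PySem.Chars.join [','] (((PySem.List.enumerate seq.toList).filter
    (fun p => chars.contains p.2)).map (fun p => PySem.Int.toChars (p.1 + 1)))

def base_color_base_cmd_py_alt (seq : String) : String :=
  let a := bccBucket seq ['A']
  let t := bccBucket seq ['T', 'U']
  let c := bccBucket seq ['C']
  let g := bccBucket seq ['G']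
  String.mk
    ((if a ≠ [] then "-applyBasesStyle1on \"".toList ++ a ++ "\" ".toList else []) ++
     (if t ≠ [] then "-applyBasesStyle2on \"".toList ++ t ++ "\" ".toList else []) ++
     (if c ≠ [] then "-applyBasesStyle3on \"".toList ++ c ++ "\" ".toList else []) ++
     (if g ≠ [] then "-applyBasesStyle4on \"".toList ++ g ++ "\" ".toList else []))

-- ===== PRECONDITION & SPEC =====
def Spec_base_color_base_cmd_py (seq : String) (out : String) : Prop := out = base_color_base_cmd_py_alt seq
instance (seq : String) (out : String) : Decidable (Spec_base_color_base_cmd_py seq out) := by unfold Spec_base_color_base_cmd_py; infer_instance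

-- ===== CLAIM (what is proved, stated in full; the proofs are below) =====
def Claim_equal_base_color_base_cmd_py : Prop := ∀ (seq : String), Dom_base_color_base_cmd_py seq → Spec_base_color_base_cmd_py seq (base_color_base_cmd_py seq)

-- ===== LEMMAS AND PROOFS =====

-- one accumulator of A's loop, in isolation
def bccAcc (p : Char → Prop) [DecidablePred p] : List Char → Int → List Char → List Char
  | [], _, acc => acc
  | ch :: rest, idx, acc =>
    bccAcc p rest (idx + 1)
      (if p ch then (if acc = [] then acc ++ PySem.Int.toChars (idx + 1) else acc ++ ',' :: PySem.Int.toChars (idx + 1)) else acc)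

-- the list of decimal fragments selected by p
def bccStrs (p : Char → Prop) [DecidablePred p] : List Char → Int → List (List Char)
  | [], _ => []
  | ch :: rest, idx => (if p ch then [PySem.Int.toChars (idx + 1)] else []) ++ bccStrs p rest (idx + 1)

def bccTail : List (List Char) → List Char
  | [] => []
  | s :: ss => ',' :: s ++ bccTail ss

def bccJoin : List (List Char) → List Char
  | [] => []
  | s :: ss => s ++ bccTail ss

lemma bccALoop_eq (l : List Char) : ∀ (idx : Int) (A T C G : List Char),
    bccALoop l idx A T C G =
      (bccAcc (· = 'A') l idx A, bccAcc (fun c => c = 'T' ∨ c = 'U') l idx T,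
       bccAcc (· = 'C') l idx C, bccAcc (· = 'G') l idx G) := by
  induction l with
  | nil => intro idx A T C G; rfl
  | cons ch rest ih =>
    intro idx A T C G
    simp only [bccALoop, bccAcc]
    rw [ih]

lemma bccToDigitsCore_len_ge (b : Nat) : ∀ (f n : Nat) (l : List Char),
    l.length ≤ (Nat.toDigitsCore b f n l).length := by
  intro f
  induction f with
  | zero => intro n l; simp [Nat.toDigitsCore]
  | succ f ih =>
    intro n l
    simp only [Nat.toDigitsCore]
    split
    · simp
    · exact le_trans (by simp) (ih _ _)

lemma bccToDigits_ne_nil (b m : Nat) : Nat.toDigits b m ≠ [] := by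
  unfold Nat.toDigits
  simp only [Nat.toDigitsCore]
  split
  · simp
  · apply List.ne_nil_of_length_pos
    have h := bccToDigitsCore_len_ge b m (m / b) [Nat.digitChar (m % b)]
    simp at h
    omega

lemma bccToChars_ne_nil (n : Int) : PySem.Int.toChars n ≠ [] := by
  unfold PySem.Int.toChars
  split
  · simp
  · exact bccToDigits_ne_nil _ _

lemma bccAcc_eq (p : Char → Prop) [DecidablePred p] (l : List Char) : ∀ (idx : Int) (acc : List Char),
    bccAcc p l idx acc =
      if acc = [] then bccJoin (bccStrs p l idx) else acc ++ bccTail (bccStrs p l idx) := by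
  induction l with
  | nil =>
    intro idx acc
    simp only [bccAcc, bccStrs, bccJoin, bccTail]
    split <;> simp_all
  | cons ch rest ih =>
    intro idx acc
    simp only [bccAcc, bccStrs]
    by_cases hp : p ch
    · simp only [if_pos hp]
      by_cases ha : acc = []
      · subst ha
        simp only [List.nil_append, List.singleton_append]
        rw [ih]
        simp [bccToChars_ne_nil (idx + 1), bccJoin]
      · simp only [if_neg ha]
        rw [ih]
        have hne : acc ++ ',' :: PySem.Int.toChars (idx + 1) ≠ [] := by simp
        simp only [if_neg hne, List.singleton_append, bccTail]
        simp [List.append_assoc]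
    · simp only [if_neg hp, List.nil_append]
      exact ih _ _

lemma bccJoin_eq_join : ∀ (ss : List (List Char)), PySem.Chars.join [','] ss = bccJoin ss := by
  have aux : ∀ (ss : List (List Char)) (s : List Char),
      List.intercalate [','] (s :: ss) = s ++ bccTail ss := by
    intro ss
    induction ss with
    | nil => intro s; simp [List.intercalate, List.intersperse, bccTail]
    | cons s' ss' ih =>
      intro s
      have h1 : List.intercalate [','] (s :: s' :: ss') =
          s ++ [','] ++ List.intercalate [','] (s' :: ss') := by
        simp [List.intercalate, List.intersperse]
      rw [h1, ih]
      simp [bccTail, List.append_assoc]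
  intro ss
  cases ss with
  | nil => simp [PySem.Chars.join, List.intercalate, bccJoin]
  | cons s ss => simpa [PySem.Chars.join, bccJoin] using aux ss s

lemma bccStrs_eq (bs : List Char) (p : Char → Prop) [DecidablePred p]
    (h : ∀ c, p c ↔ bs.contains c = true) (l : List Char) : ∀ (idx : Int),
    bccStrs p l idx =
      ((PySem.List.enumerate l idx).filter (fun x => bs.contains x.2)).map
        (fun x => PySem.Int.toChars (x.1 + 1)) := by
  induction l with
  | nil => intro idx; simp [bccStrs, PySem.List.enumerate_nil]
  | cons ch rest ih =>
    intro idx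
    simp only [bccStrs, PySem.List.enumerate_cons, List.filter_cons]
    by_cases hc : ch ∈ bs
    · rw [if_pos ((h ch).mpr (by simpa using hc))]
      simp [hc, ih]
    · rw [if_neg (fun hp => hc (by simpa using (h ch).mp hp))]
      simp [hc, ih]

lemma bccBucket_eq (seq : String) (bs : List Char) (p : Char → Prop) [DecidablePred p]
    (h : ∀ c, p c ↔ bs.contains c = true) :
    bccBucket seq bs = bccJoin (bccStrs p seq.toList 0) := by
  unfold bccBucket
  rw [bccStrs_eq bs p h, bccJoin_eq_join]

-- ===== VERDICT (by name: the statement is the Claim_ definition above) =====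
theorem base_color_base_cmd_py_spec : Claim_equal_base_color_base_cmd_py := by
  intro seq _
  unfold Spec_base_color_base_cmd_py base_color_base_cmd_py base_color_base_cmd_py_alt
  have hA : bccAcc (· = 'A') seq.toList 0 [] = bccBucket seq ['A'] := by
    rw [bccAcc_eq, if_pos rfl, bccBucket_eq seq ['A'] (· = 'A') (by intro c; simp)]
  have hT : bccAcc (fun c => c = 'T' ∨ c = 'U') seq.toList 0 [] = bccBucket seq ['T', 'U'] := by
    rw [bccAcc_eq, if_pos rfl,
      bccBucket_eq seq ['T', 'U'] (fun c => c = 'T' ∨ c = 'U') (by intro c; simp)]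
  have hC : bccAcc (· = 'C') seq.toList 0 [] = bccBucket seq ['C'] := by
    rw [bccAcc_eq, if_pos rfl, bccBucket_eq seq ['C'] (· = 'C') (by intro c; simp)]
  have hG : bccAcc (· = 'G') seq.toList 0 [] = bccBucket seq ['G'] := by
    rw [bccAcc_eq, if_pos rfl, bccBucket_eq seq ['G'] (· = 'G') (by intro c; simp)]
  simp only [bccALoop_eq, hA, hT, hC, hG]
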